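-- pv_equiv track=rewrite | github.com/PolicyStat/htmltreediff | htmltreediff/lcs.py | build_pairwise_match_matrix
-- ===== SOURCE A (Python) =====
-- def build_pairwise_match_matrix(old_hashes, new_hashes):
--     n = len(old_hashes)
--     m = len(new_hashes)
--     match_matrix = [[False] * m for _ in range(n)]
--     for i in range(n):
--         for j in range(m):
--             match_matrix[i][j] = (old_hashes[i] == new_hashes[j])
--     return match_matrix
-- ===== SOURCE B (Python) =====
-- def build_pairwise_match_matrix(old_hashes, new_hashes):
--     index = {}
--     for j, h in enumerate(new_hashes):
--         index.setdefault(h, []).append(j)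
--     m = len(new_hashes)
--     matrix = []
--     for h in old_hashes:
--         row = [False] * m
--         for j in index.get(h, []):
--             row[j] = True
--         matrix.append(row)
--     return matrix
-- ===== Notes on version B (the rewrite author's own statement) =====
-- stated objective: alternative
-- what changed: Instead of comparing every (i,j) pair, B builds a dict from each value of new_hashes to its column positions in one pass, then for each row allocates an all-False row and sets True only at the looked-up matching columns.
import Mathlib
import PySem

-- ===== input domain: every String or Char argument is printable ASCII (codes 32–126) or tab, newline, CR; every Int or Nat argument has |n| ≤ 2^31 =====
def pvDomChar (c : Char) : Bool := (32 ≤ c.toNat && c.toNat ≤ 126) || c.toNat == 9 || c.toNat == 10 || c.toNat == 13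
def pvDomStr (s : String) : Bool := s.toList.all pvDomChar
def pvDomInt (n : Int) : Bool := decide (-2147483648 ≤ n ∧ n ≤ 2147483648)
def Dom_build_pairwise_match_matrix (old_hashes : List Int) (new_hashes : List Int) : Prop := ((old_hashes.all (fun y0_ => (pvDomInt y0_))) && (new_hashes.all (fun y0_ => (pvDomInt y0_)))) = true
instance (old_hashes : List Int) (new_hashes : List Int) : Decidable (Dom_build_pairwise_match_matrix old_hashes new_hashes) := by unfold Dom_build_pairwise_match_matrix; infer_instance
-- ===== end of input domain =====

-- B replaces the full n×m pairwise comparison by a one-pass index of new_hashes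
-- (value → column positions) and writes only the matching cells of a False grid;
-- objective: alternative decomposition with the same return value.

-- ===== PORT A =====
-- literal port of A: allocate n×m False matrix, then set every cell by comparison
def build_pairwise_match_matrix (old_hashes : List Int) (new_hashes : List Int) : List (List Bool) :=
  let n : Int := PySem.List.len old_hashes
  let m : Int := PySem.List.len new_hashes
  let match_matrix : List (List Bool) :=
    (PySem.List.pyRange 0 n 1).map (fun _ => List.replicate m.toNat false)
  (PySem.List.pyRange 0 n 1).foldl (fun mm i =>
    (PySem.List.pyRange 0 m 1).foldl (fun mm j =>
      PySem.List.pySetD mm i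
        (PySem.List.pySetD (PySem.List.pyGetD mm i []) j
          (decide (PySem.List.pyGetD old_hashes i 0 = PySem.List.pyGetD new_hashes j 0)))) mm)
    match_matrix

-- ===== PORT B =====
-- index.setdefault(h, []).append(j) over enumerate(new_hashes)
def bpmIndex (new_hashes : List Int) : PySem.Dict Int (List Int) :=
  (PySem.List.enumerate new_hashes 0).foldl
    (fun d p => d.modify p.2 [] (fun l => l ++ [p.1])) PySem.Dict.empty

def build_pairwise_match_matrix_alt (old_hashes : List Int) (new_hashes : List Int) : List (List Bool) :=
  let index := bpmIndex new_hashes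
  let m := new_hashes.length
  old_hashes.map (fun h =>
    (index.getD h []).foldl (fun row j => PySem.List.pySetD row j true)
      (List.replicate m false))

-- ===== PRECONDITION & SPEC =====
def Spec_build_pairwise_match_matrix (old_hashes : List Int) (new_hashes : List Int) (out : List (List Bool)) : Prop := out = build_pairwise_match_matrix_alt old_hashes new_hashes
instance (old_hashes : List Int) (new_hashes : List Int) (out : List (List Bool)) : Decidable (Spec_build_pairwise_match_matrix old_hashes new_hashes out) := by unfold Spec_build_pairwise_match_matrix; infer_instance

-- ===== CLAIM (what is proved, stated in full; the proofs are below) =====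
def Claim_equal_build_pairwise_match_matrix : Prop := ∀ (old_hashes : List Int) (new_hashes : List Int), Dom_build_pairwise_match_matrix old_hashes new_hashes → Spec_build_pairwise_match_matrix old_hashes new_hashes (build_pairwise_match_matrix old_hashes new_hashes)

-- ===== LEMMAS AND PROOFS =====

-- the common specification both programs compute
def bpmSpec (old_hashes new_hashes : List Int) : List (List Bool) :=
  old_hashes.map (fun h => new_hashes.map (fun x => decide (h = x)))

-- generic: folding 'set each index k < n to g k' fills the first n entries
theorem bpm_setfold {α : Type} (g : Nat → α) :
    ∀ (k : Nat) (l : List α), k ≤ l.length →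
      (List.range k).foldl (fun l i => l.set i (g i)) l = (List.range k).map g ++ l.drop k := by
  intro k
  induction k with
  | zero => intro l _; simp
  | succ k ih =>
    intro l hl
    rw [List.range_succ, List.foldl_append, ih l (by omega)]
    simp only [List.foldl_cons, List.foldl_nil, List.map_append, List.map_cons, List.map_nil]
    have hk : k < l.length := by omega
    rw [List.set_append]
    have h2 : ¬ (k < (List.map g (List.range k)).length) := by simp
    rw [if_neg h2]
    simp only [List.length_map, List.length_range, Nat.sub_self]
    rw [List.drop_eq_getElem_cons hk, List.set_cons_zero]
    simp

-- the inner j-loop only rewrites row i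
theorem bpm_inner (f : Nat → Bool) (i : Nat) :
    ∀ (l : List Nat) (mm : List (List Bool)), i < mm.length →
      l.foldl (fun mm j => mm.set i ((mm.getD i []).set j (f j))) mm
        = mm.set i (l.foldl (fun r j => r.set j (f j)) (mm.getD i [])) := by
  intro l
  induction l with
  | nil =>
    intro mm hi
    simp only [List.foldl_nil, List.getD]
    rw [List.getElem?_eq_getElem hi]
    simp
  | cons j l ih =>
    intro mm hi
    simp only [List.foldl_cons]
    rw [ih _ (by simpa using hi)]
    rw [List.set_set]
    congr 1
    simp [List.getD, List.getElem?_set_self, hi]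

theorem bpm_fold_set_true_getD (l : List Nat) :
    ∀ (r : List Bool) (k : Nat),
      (l.foldl (fun r j => r.set j true) r).getD k false
        = if k ∈ l ∧ k < r.length then true else r.getD k false := by
  induction l with
  | nil => intro r k; simp
  | cons j l ih =>
    intro r k
    simp only [List.foldl_cons]
    rw [ih]
    simp only [List.length_set, List.mem_cons]
    by_cases hm : k ∈ l ∧ k < r.length
    · simp [hm]
    · rw [if_neg hm]
      by_cases hkj : k = j
      · subst hkj
        by_cases hk : k < r.length
        · simp [hk, List.getD_eq_getElem _ _ hk, List.getElem_set_self]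
        · have : r.set k true = r := List.set_eq_of_length_le (by omega)
          simp [this, hk]
      · have : (r.set j true).getD k false = r.getD k false := by
          rcases Nat.lt_or_ge k r.length with hk | hk
          · rw [List.getD_eq_getElem _ _ (show k < (r.set j true).length by simpa using hk),
              List.getD_eq_getElem _ _ hk, List.getElem_set_ne (by omega)]
          · rw [List.getD_eq_default _ _ (by simpa using hk), List.getD_eq_default _ _ hk]
        rw [this]
        have : ¬ ((k = j ∨ k ∈ l) ∧ k < r.length) := by
          rintro ⟨hc, hk⟩
          rcases hc with h | h
          · exact hkj h
          · exact hm ⟨h, hk⟩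
        rw [if_neg this]

theorem bpm_fold_set_true_length (l : List Nat) :
    ∀ (r : List Bool), (l.foldl (fun r j => r.set j true) r).length = r.length := by
  induction l with
  | nil => intro r; rfl
  | cons j l ih => intro r; rw [List.foldl_cons, ih]; simp

theorem bpm_filterMap_if {α β : Type} (c : α → Prop) [DecidablePred c] (g : α → β) :
    ∀ (l : List α), l.filterMap (fun x => if c x then some (g x) else none)
      = (l.filter (fun x => decide (c x))).map g := by
  intro l
  induction l with
  | nil => rfl
  | cons x l ih =>
    by_cases hx : c x
    · simp [hx, ih]
    · simp [hx, ih]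

-- index dict lookup = append of matching positions
theorem bpm_index_fold (h : Int) :
    ∀ (l : List (Int × Int)) (d : PySem.Dict Int (List Int)),
      (l.foldl (fun d p => d.modify p.2 [] (fun acc => acc ++ [p.1])) d).getD h []
        = d.getD h [] ++ l.filterMap (fun p => if p.2 = h then some p.1 else none) := by
  intro l
  induction l with
  | nil => intro d; simp
  | cons p l ih =>
    intro d
    simp only [List.foldl_cons, List.filterMap_cons]
    rw [ih, PySem.Dict.getD_modify]
    by_cases hp : h = p.2
    · simp [hp, List.append_assoc]
    · rw [if_neg hp, if_neg (fun e => hp e.symm)]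

theorem bpm_index_getD (new_hashes : List Int) (h : Int) :
    (bpmIndex new_hashes).getD h []
      = ((List.range new_hashes.length).filter
            (fun k => decide (new_hashes.getD k 0 = h))).map (Nat.cast : Nat → Int) := by
  unfold bpmIndex
  rw [bpm_index_fold, PySem.List.enumerate_eq_map_pyRange new_hashes 0,
    PySem.List.pyRange_one]
  simp only [List.map_map, List.filterMap_map, Function.comp_def, zero_add,
    PySem.List.pyGetD_natCast, PySem.List.len_eq, sub_zero, Int.toNat_natCast]
  rw [bpm_filterMap_if (fun k : Nat => new_hashes.getD k 0 = h) (Nat.cast : Nat → Int)]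
  simp only [PySem.Dict.getD_empty, List.nil_append]

-- B's row equals the spec row
theorem bpm_row (new_hashes : List Int) (h : Int) :
    ((bpmIndex new_hashes).getD h []).foldl (fun row j => PySem.List.pySetD row j true)
        (List.replicate new_hashes.length false)
      = new_hashes.map (fun x => decide (h = x)) := by
  rw [bpm_index_getD, List.foldl_map]
  have hstep : (fun (row : List Bool) (k : Nat) => PySem.List.pySetD row (k : Int) true)
      = fun row k => row.set k true := by
    funext row k
    simp
  rw [hstep]
  apply List.ext_getElem
  · rw [bpm_fold_set_true_length]
    simp
  · intro k hk1 hk2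
    have hkm : k < new_hashes.length := by simpa using hk2
    rw [← List.getD_eq_getElem _ false hk1, bpm_fold_set_true_getD, List.getElem_map]
    simp only [List.mem_filter, List.mem_range, List.length_replicate, decide_eq_true_eq]
    by_cases hx : new_hashes.getD k 0 = h
    · rw [if_pos ⟨⟨hkm, hx⟩, hkm⟩]
      rw [List.getD_eq_getElem _ _ hkm] at hx
      simp [← hx]
    · have : ¬ ((k < new_hashes.length ∧ new_hashes.getD k 0 = h) ∧ k < new_hashes.length) := by
        rintro ⟨⟨_, hc⟩, _⟩; exact hx hc
      rw [if_neg this]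
      rw [List.getD_eq_getElem _ _ hkm] at hx
      have hrep : (List.replicate new_hashes.length false).getD k false = false := by
        simp [List.getD]
      rw [hrep]
      symm
      simp only [decide_eq_false_iff_not]
      exact fun e => hx e.symm

theorem bpm_inner_oob (f : Nat → Bool) (i : Nat) :
    ∀ (l : List Nat) (mm : List (List Bool)), mm.length ≤ i →
      l.foldl (fun mm j => mm.set i ((mm.getD i []).set j (f j))) mm = mm := by
  intro l
  induction l with
  | nil => intro mm _; rfl
  | cons j l ih =>
    intro mm hi
    simp only [List.foldl_cons]
    rw [List.set_eq_of_length_le hi, ih mm hi]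

theorem bpm_outer (g : Nat → Nat → Bool) (m' : Nat) :
    ∀ (l : List Nat) (mm : List (List Bool)), (∀ r ∈ mm, r.length = m') →
      l.foldl (fun mm i => (List.range m').foldl
          (fun mm j => mm.set i ((mm.getD i []).set j (g i j))) mm) mm
        = l.foldl (fun mm i => mm.set i ((List.range m').map (g i))) mm := by
  intro l
  induction l with
  | nil => intro mm _; rfl
  | cons i l ih =>
    intro mm hrows
    simp only [List.foldl_cons]
    by_cases hi : i < mm.length
    · rw [bpm_inner (g i) i (List.range m') mm hi]
      have hrow : (mm.getD i []).length = m' := by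
        rw [List.getD_eq_getElem _ _ hi]
        exact hrows _ (List.getElem_mem hi)
      rw [bpm_setfold (g i) m' (mm.getD i []) (le_of_eq hrow.symm)]
      have hdrop : (mm.getD i []).drop m' = ([] : List Bool) := by
        rw [← hrow]; exact List.drop_length
      rw [hdrop, List.append_nil]
      apply ih
      intro r hr
      rcases List.mem_or_eq_of_mem_set hr with h | h
      · exact hrows r h
      · subst h; simp
    · rw [bpm_inner_oob (g i) i (List.range m') mm (by omega),
        List.set_eq_of_length_le (by omega)]
      exact ih mm hrows

theorem bpm_map_range_getD {β : Type} (xs : List Int) (f : Int → β) :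
    (List.range xs.length).map (fun i => f (xs.getD i 0)) = xs.map f := by
  apply List.ext_getElem
  · simp
  · intro k hk1 hk2
    have hkx : k < xs.length := by simpa using hk2
    simp [List.getElem?_eq_getElem hkx]

-- A equals the spec
theorem bpm_A_eq_spec (old_hashes new_hashes : List Int) :
    build_pairwise_match_matrix old_hashes new_hashes = bpmSpec old_hashes new_hashes := by
  unfold build_pairwise_match_matrix
  simp only [PySem.List.len_eq, PySem.List.pyRange_one, sub_zero, Int.toNat_natCast,
    zero_add, List.map_map, List.foldl_map, Function.comp_def,
    PySem.List.pySetD_natCast, PySem.List.pyGetD_natCast]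
  rw [show (List.range old_hashes.length).map
        (fun _ => List.replicate new_hashes.length false)
      = List.replicate old_hashes.length (List.replicate new_hashes.length false) by
    simp [List.map_const']]
  rw [bpm_outer (fun i j => decide (old_hashes.getD i 0 = new_hashes.getD j 0))
    new_hashes.length (List.range old_hashes.length)
    (List.replicate old_hashes.length (List.replicate new_hashes.length false))
    (by intro r hr; simp_all [List.eq_of_mem_replicate hr])]
  rw [bpm_setfold (fun i => (List.range new_hashes.length).map
      (fun j => decide (old_hashes.getD i 0 = new_hashes.getD j 0)))
    old_hashes.length (List.replicate old_hashes.length (List.replicate new_hashes.length false))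
    (by simp)]
  rw [show List.drop old_hashes.length
      (List.replicate old_hashes.length (List.replicate new_hashes.length false))
      = ([] : List (List Bool)) by simp, List.append_nil]
  unfold bpmSpec
  rw [← bpm_map_range_getD old_hashes (fun h => new_hashes.map (fun x => decide (h = x)))]
  apply List.map_congr_left
  intro i _
  exact bpm_map_range_getD new_hashes (fun x => decide (old_hashes.getD i 0 = x))

-- B equals the spec
theorem bpm_B_eq_spec (old_hashes new_hashes : List Int) :
    build_pairwise_match_matrix_alt old_hashes new_hashes = bpmSpec old_hashes new_hashes := by
  unfold build_pairwise_match_matrix_alt bpmSpec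
  simp only []
  exact List.map_congr_left (fun h _ => bpm_row new_hashes h)

-- ===== VERDICT (by name: the statement is the Claim_ definition above) =====
theorem build_pairwise_match_matrix_spec : Claim_equal_build_pairwise_match_matrix := by
  intro old_hashes new_hashes _
  unfold Spec_build_pairwise_match_matrix
  rw [bpm_A_eq_spec, bpm_B_eq_spec]
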